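-- pv_equiv track=rewrite | github.com/gabriellemarch/trp-benefits-automation | trp_core.py | _add_month
-- ===== SOURCE A (Python) =====
-- def _add_month(y: int, m: int, delta: int = 1) -> tuple[int, int]:
--     # delta=1 means next month
--     nm = m + delta
--     ny = y
--     while nm > 12:
--         nm -= 12
--         ny += 1
--     while nm < 1:
--         nm += 12
--         ny -= 1
--     return ny, nm
-- ===== SOURCE B (Python) =====
-- def _add_month(y: int, m: int, delta: int = 1) -> tuple[int, int]:
--     # closed form: no loops; Python's floored divmod normalizes the month into 1..12
--     q, r = divmod(m - 1 + delta, 12)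
--     return y + q, r + 1
-- ===== Notes on version B (the rewrite author's own statement) =====
-- stated objective: simpler
-- what changed: Replaced both normalization while-loops with a single closed-form divmod(m-1+delta, 12), relying on Python's floored division.
import Mathlib
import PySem

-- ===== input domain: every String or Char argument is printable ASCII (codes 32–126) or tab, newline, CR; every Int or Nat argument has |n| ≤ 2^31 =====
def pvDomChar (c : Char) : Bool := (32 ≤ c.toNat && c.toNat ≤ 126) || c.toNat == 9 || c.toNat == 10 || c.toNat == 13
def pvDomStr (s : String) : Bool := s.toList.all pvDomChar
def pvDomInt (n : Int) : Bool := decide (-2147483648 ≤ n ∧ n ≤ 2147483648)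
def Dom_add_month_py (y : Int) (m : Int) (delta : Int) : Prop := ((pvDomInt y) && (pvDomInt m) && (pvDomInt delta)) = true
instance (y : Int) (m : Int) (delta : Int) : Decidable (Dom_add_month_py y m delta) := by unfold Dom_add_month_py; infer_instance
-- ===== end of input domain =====

-- B replaces A's two normalization while-loops with one closed-form floored divmod (simpler).


-- ===== PORT A =====
-- while nm > 12: nm -= 12; ny += 1
def addMonthLoopUp (nm ny : Int) : Int × Int :=
  if nm > 12 then addMonthLoopUp (nm - 12) (ny + 1) else (nm, ny)
termination_by nm.toNat
decreasing_by omega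

-- while nm < 1: nm += 12; ny -= 1
def addMonthLoopDown (nm ny : Int) : Int × Int :=
  if nm < 1 then addMonthLoopDown (nm + 12) (ny - 1) else (nm, ny)
termination_by (1 - nm).toNat
decreasing_by omega

def add_month_py (y : Int) (m : Int) (delta : Int) : Int × Int :=
  let nm := m + delta
  let ny := y
  let p1 := addMonthLoopUp nm ny
  let p2 := addMonthLoopDown p1.1 p1.2
  (p2.2, p2.1)

-- ===== PORT B =====
def add_month_py_alt (y : Int) (m : Int) (delta : Int) : Int × Int :=
  let q := PySem.Int.floordiv (m - 1 + delta) 12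
  let r := PySem.Int.mod (m - 1 + delta) 12
  (y + q, r + 1)

-- ===== PRECONDITION & SPEC =====
def Spec_add_month_py (y : Int) (m : Int) (delta : Int) (out : Int × Int) : Prop := out = add_month_py_alt y m delta
instance (y : Int) (m : Int) (delta : Int) (out : Int × Int) : Decidable (Spec_add_month_py y m delta out) := by unfold Spec_add_month_py; infer_instance

-- ===== CLAIM (what is proved, stated in full; the proofs are below) =====
def Claim_equal_add_month_py : Prop := ∀ (y : Int) (m : Int) (delta : Int), Dom_add_month_py y m delta → Spec_add_month_py y m delta (add_month_py y m delta)

-- ===== LEMMAS AND PROOFS =====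

-- closed form after the first loop, valid whenever nm ≥ 1
theorem addMonthLoopUp_eq (nm ny : Int) (h : 1 ≤ nm) :
    addMonthLoopUp nm ny = ((nm - 1) % 12 + 1, ny + (nm - 1) / 12) := by
  induction nm, ny using addMonthLoopUp.induct with
  | case1 nm ny h12 ih =>
    rw [addMonthLoopUp, if_pos h12, ih (by omega)]
    simp only [Prod.mk.injEq]; omega
  | case2 nm ny h12 =>
    rw [addMonthLoopUp, if_neg h12]
    simp only [Prod.mk.injEq]; omega

-- closed form after the second loop, valid whenever nm ≤ 12
theorem addMonthLoopDown_eq (nm ny : Int) (h : nm ≤ 12) :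
    addMonthLoopDown nm ny = ((nm - 1) % 12 + 1, ny + (nm - 1) / 12) := by
  induction nm, ny using addMonthLoopDown.induct with
  | case1 nm ny h1 ih =>
    rw [addMonthLoopDown, if_pos h1, ih (by omega)]
    simp only [Prod.mk.injEq]; omega
  | case2 nm ny h1 =>
    rw [addMonthLoopDown, if_neg h1]
    simp only [Prod.mk.injEq]; omega

-- ===== VERDICT (by name: the statement is the Claim_ definition above) =====
theorem add_month_py_spec : Claim_equal_add_month_py := by
  intro y m delta _
  unfold Spec_add_month_py add_month_py add_month_py_alt
  rw [PySem.Int.floordiv_eq_ediv_of_pos (by norm_num), PySem.Int.mod_eq_emod_of_pos (by norm_num)]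
  simp only []
  by_cases h : m + delta ≥ 1
  · rw [addMonthLoopUp_eq _ _ h]
    rw [addMonthLoopDown_eq _ _ (by omega)]
    simp only [Prod.mk.injEq]; omega
  · rw [addMonthLoopUp, if_neg (by omega)]
    rw [addMonthLoopDown_eq _ _ (by omega)]
    simp only [Prod.mk.injEq]; omega
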